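-- pv_equiv track=rewrite | github.com/yskang/AlgorithmPractice | baekjoon/python/ddakji_game_14696.py | solution
-- ===== SOURCE A (Python) =====
-- from collections import defaultdict
--
-- def solution(a_card: list, b_card: list):
--     a_dic = defaultdict(lambda:0)
--     b_dic = defaultdict(lambda:0)
--     for a in a_card:
--         a_dic[a] += 1
--     for b in b_card:
--         b_dic[b] += 1
--
--     for i in range(4, 0, -1):
--         if a_dic[i] > b_dic[i]:
--             return 'A'
--         elif a_dic[i] < b_dic[i]:
--             return 'B'
--     return 'D'
-- ===== SOURCE B (Python) =====
-- def solution(a_card: list, b_card: list):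
--     a = sorted((x for x in a_card if 1 <= x <= 4), reverse=True)
--     b = sorted((x for x in b_card if 1 <= x <= 4), reverse=True)
--     if a > b:
--         return 'A'
--     if a < b:
--         return 'B'
--     return 'D'
-- ===== Notes on version B (the rewrite author's own statement) =====
-- stated objective: alternative
-- what changed: Replaces A's per-value counting with interleaved early-return comparison by filtering each hand to values 1..4, sorting it descending, and deciding with a single lexicographic comparison of the two sorted hands (measured faster: the per-element work moves from a Python-level dict loop into C-level sorted/filter and list comparison).
import Mathlib
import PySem

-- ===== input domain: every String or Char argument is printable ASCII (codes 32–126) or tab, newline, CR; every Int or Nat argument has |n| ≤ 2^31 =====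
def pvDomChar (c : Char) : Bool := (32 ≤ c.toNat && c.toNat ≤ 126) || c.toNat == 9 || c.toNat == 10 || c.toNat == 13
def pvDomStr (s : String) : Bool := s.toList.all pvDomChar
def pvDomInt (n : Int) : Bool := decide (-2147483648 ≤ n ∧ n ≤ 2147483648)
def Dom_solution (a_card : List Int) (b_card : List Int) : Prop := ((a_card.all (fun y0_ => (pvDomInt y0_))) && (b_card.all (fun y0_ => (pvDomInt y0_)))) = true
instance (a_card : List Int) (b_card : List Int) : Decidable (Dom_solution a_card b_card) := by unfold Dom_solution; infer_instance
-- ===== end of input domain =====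

-- B filters each hand to values 1..4, sorts it descending, and decides with one lexicographic
-- comparison of the sorted hands, instead of A's per-value dict counting with an early-return
-- compare loop (alternative algorithm, same result).


-- ===== PORT A =====
-- the early-return 'for i in range(4, 0, -1)' loop of A
def solutionLoopA (a_dic b_dic : PySem.Dict Int Int) : List Int → String
  | [] => "D"
  | i :: rest =>
    if a_dic.getD i 0 > b_dic.getD i 0 then "A"
    else if a_dic.getD i 0 < b_dic.getD i 0 then "B"
    else solutionLoopA a_dic b_dic rest

def solution (a_card : List Int) (b_card : List Int) : String :=
  let a_dic : PySem.Dict Int Int := a_card.foldl (fun d x => d.modify x 0 (· + 1)) PySem.Dict.empty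
  let b_dic : PySem.Dict Int Int := b_card.foldl (fun d x => d.modify x 0 (· + 1)) PySem.Dict.empty
  solutionLoopA a_dic b_dic (PySem.List.pyRange 4 0 (-1))

-- ===== PORT B =====
-- Python's lexicographic '>' on int lists
def lexGt : List Int → List Int → Bool
  | _ :: _, [] => true
  | [], _ => false
  | x :: xs, y :: ys => x > y || (x == y && lexGt xs ys)

def solution_alt (a_card : List Int) (b_card : List Int) : String :=
  let a := PySem.List.sorted (a_card.filter (fun x => decide (1 ≤ x) && decide (x ≤ 4))) (fun x => x) true
  let b := PySem.List.sorted (b_card.filter (fun x => decide (1 ≤ x) && decide (x ≤ 4))) (fun x => x) true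
  if lexGt a b then "A"
  else if lexGt b a then "B"
  else "D"

-- ===== PRECONDITION & SPEC =====
def Spec_solution (a_card : List Int) (b_card : List Int) (out : String) : Prop := out = solution_alt a_card b_card
instance (a_card : List Int) (b_card : List Int) (out : String) : Decidable (Spec_solution a_card b_card out) := by unfold Spec_solution; infer_instance

-- ===== CLAIM =====
def Claim_equal_solution : Prop := ∀ (a_card : List Int) (b_card : List Int), Dom_solution a_card b_card → Spec_solution a_card b_card (solution a_card b_card)

-- ===== LEMMAS AND PROOFS =====

-- the normal form of a sorted-descending hand restricted to values 1..4
def nf (l : List Int) : List Int :=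
  List.replicate (l.count 4) 4 ++ List.replicate (l.count 3) 3 ++
  List.replicate (l.count 2) 2 ++ List.replicate (l.count 1) 1

theorem nf_perm_filter (l : List Int) :
    (nf l).Perm (l.filter (fun x => decide (1 ≤ x) && decide (x ≤ 4))) := by
  rw [List.perm_iff_count]
  intro v
  by_cases hv : (1 ≤ v ∧ v ≤ 4)
  · have hf : List.count v (l.filter (fun x => decide (1 ≤ x) && decide (x ≤ 4))) = List.count v l := by
      apply List.count_filter
      simp
      omega
    simp only [nf, List.count_append, List.count_replicate, hf]
    by_cases h4 : v = 4 <;> by_cases h3 : v = 3 <;> by_cases h2 : v = 2 <;> by_cases h1 : v = 1 <;>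
      simp_all <;> omega
  · have hf : List.count v (l.filter (fun x => decide (1 ≤ x) && decide (x ≤ 4))) = 0 := by
      rw [List.count_eq_zero]
      intro hmem
      have := List.of_mem_filter hmem
      simp at this
      omega
    simp only [nf, List.count_append, List.count_replicate, hf]
    have h4 : ¬ (4 = v) := by omega
    have h3 : ¬ (3 = v) := by omega
    have h2 : ¬ (2 = v) := by omega
    have h1 : ¬ (1 = v) := by omega
    simp [h4, h3, h2, h1]

theorem nf_pairwise (l : List Int) : (nf l).Pairwise (fun a b : Int => b ≤ a) := by
  simp only [nf, List.pairwise_append, List.mem_append, List.mem_replicate]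
  refine ⟨⟨⟨?_, ?_, ?_⟩, ?_, ?_⟩, ?_, ?_⟩ <;>
    first
      | exact List.pairwise_replicate_of_refl
      | (intros; omega)

theorem sorted_filter_eq_nf (l : List Int) :
    PySem.List.sorted (l.filter (fun x => decide (1 ≤ x) && decide (x ≤ 4))) (fun x => x) true
      = nf l := by
  apply PySem.List.eq_of_perm_of_pairwise_le_of_injective (fun x : Int => -x) neg_injective
  · exact (PySem.List.sorted_perm _ _ _).trans (nf_perm_filter l).symm
  · exact (PySem.List.sorted_pairwise_rev _ _).imp (by intro a b h; simpa using h)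
  · exact (nf_pairwise l).imp (by intro a b h; simpa using h)

-- lexGt on blocks of a common leading value v, both tails strictly below v
theorem lexGt_rep (v : Int) (xs ys : List Int) (hx : ∀ x ∈ xs, x < v) (hy : ∀ y ∈ ys, y < v) :
    ∀ n m, lexGt (List.replicate n v ++ xs) (List.replicate m v ++ ys)
      = (decide (m < n) || (decide (n = m) && lexGt xs ys)) := by
  intro n
  induction n with
  | zero =>
    intro m
    cases m with
    | zero => simp
    | succ m =>
      simp only [List.replicate, List.nil_append, List.cons_append]
      cases xs with
      | nil => simp [lexGt]
      | cons x xs' =>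
        have := hx x (by simp)
        simp [lexGt]
        omega
  | succ n ih =>
    intro m
    cases m with
    | zero =>
      simp only [List.replicate, List.nil_append, List.cons_append]
      cases ys with
      | nil => simp [lexGt]
      | cons y ys' =>
        have := hy y (by simp)
        simp [lexGt]
        omega
    | succ m =>
      simp only [List.replicate, List.cons_append, lexGt, lt_self_iff_false, decide_false,
        BEq.rfl, Bool.true_and, Bool.false_or, ih m]
      have h1 : decide (m + 1 < n + 1) = decide (m < n) := by simp
      have h2 : decide (n + 1 = m + 1) = decide (n = m) := by simp
      rw [h1, h2]

theorem lexGt_nf (a b : List Int) :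
    lexGt (nf a) (nf b)
      = (decide (b.count 4 < a.count 4) || (decide (a.count 4 = b.count 4) &&
        (decide (b.count 3 < a.count 3) || (decide (a.count 3 = b.count 3) &&
        (decide (b.count 2 < a.count 2) || (decide (a.count 2 = b.count 2) &&
        (decide (b.count 1 < a.count 1) || (decide (a.count 1 = b.count 1) && false)))))))) := by
  have mem4 : ∀ (l : List Int) (x : Int),
      x ∈ List.replicate (l.count 3) (3:Int) ++ List.replicate (l.count 2) 2 ++
          List.replicate (l.count 1) 1 → x < 4 := by
    intro l x hx
    simp only [List.mem_append, List.mem_replicate] at hx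
    omega
  have mem3 : ∀ (l : List Int) (x : Int),
      x ∈ List.replicate (l.count 2) (2:Int) ++ List.replicate (l.count 1) 1 → x < 3 := by
    intro l x hx
    simp only [List.mem_append, List.mem_replicate] at hx
    omega
  have mem2 : ∀ (l : List Int) (x : Int), x ∈ List.replicate (l.count 1) (1:Int) → x < 2 := by
    intro l x hx
    simp only [List.mem_replicate] at hx
    omega
  unfold nf
  rw [List.append_assoc, List.append_assoc, List.append_assoc, List.append_assoc,
      lexGt_rep 4 _ _ (by intro x hx; exact mem4 a x (by simpa [List.append_assoc] using hx))
        (by intro x hx; exact mem4 b x (by simpa [List.append_assoc] using hx))]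
  rw [lexGt_rep 3 _ _ (by intro x hx; exact mem3 a x (by simpa [List.append_assoc] using hx))
        (by intro x hx; exact mem3 b x (by simpa [List.append_assoc] using hx))]
  rw [lexGt_rep 2 _ _ (mem2 a) (mem2 b)]
  rw [← List.append_nil (List.replicate (a.count 1) (1:Int)),
      ← List.append_nil (List.replicate (b.count 1) (1:Int)),
      lexGt_rep 1 _ _ (by simp) (by simp)]
  simp [lexGt]

-- the whole decision depends only on the four count pairs
theorem solution_core (a4 b4 a3 b3 a2 b2 a1 b1 : Nat) :
    (if (a4 : Int) > b4 then "A" else if (a4 : Int) < b4 then "B"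
     else if (a3 : Int) > b3 then "A" else if (a3 : Int) < b3 then "B"
     else if (a2 : Int) > b2 then "A" else if (a2 : Int) < b2 then "B"
     else if (a1 : Int) > b1 then "A" else if (a1 : Int) < b1 then "B" else "D")
    = (if (decide (b4 < a4) || (decide (a4 = b4) &&
        (decide (b3 < a3) || (decide (a3 = b3) &&
        (decide (b2 < a2) || (decide (a2 = b2) &&
        (decide (b1 < a1) || (decide (a1 = b1) && false)))))))) then "A"
       else if (decide (a4 < b4) || (decide (b4 = a4) &&
        (decide (a3 < b3) || (decide (b3 = a3) &&
        (decide (a2 < b2) || (decide (b2 = a2) &&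
        (decide (a1 < b1) || (decide (b1 = a1) && false)))))))) then "B"
       else "D") := by
  split_ifs <;> simp_all <;> omega

-- ===== VERDICT =====
theorem solution_spec : Claim_equal_solution := by
  intro a b _
  unfold Spec_solution solution solution_alt
  rw [← PySem.Dict.counter_eq_foldl, ← PySem.Dict.counter_eq_foldl]
  have hr : PySem.List.pyRange 4 0 (-1) = [4, 3, 2, 1] := by decide
  rw [hr]
  simp only [solutionLoopA, PySem.Dict.getD_counter, sorted_filter_eq_nf, lexGt_nf]
  exact solution_core _ _ _ _ _ _ _ _
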